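-- pv_equiv track=rewrite | github.com/pypi-data/pypi-mirror-360 | packages/pygitwise/pygitwise-0.2.0.tar.gz/pygitwise-0.2.0/gitwise/features/branch.py | _detect_work_type
-- ===== SOURCE A (Python) =====
-- def _detect_work_type(branch_name: str) -> str:
--     """Detect work type from branch name prefix."""
--     prefixes = {
--         'feature/': 'feature',
--         'feat/': 'feature',
--         'bugfix/': 'bugfix',
--         'fix/': 'bugfix',
--         'hotfix/': 'hotfix',
--         'chore/': 'chore',
--         'docs/': 'docs',
--         'refactor/': 'refactor',
--         'test/': 'test',
--         'release/': 'release'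
--     }
--
--     for prefix, work_type in prefixes.items():
--         if branch_name.startswith(prefix):
--             return work_type
--
--     return 'feature'  # Default to feature
-- ===== SOURCE B (Python) =====
-- def _detect_work_type(branch_name: str) -> str:
--     """Detect work type from branch name prefix."""
--     head, sep, _rest = branch_name.partition('/')
--     if not sep:
--         return 'feature'
--     if head == 'feature' or head == 'feat':
--         return 'feature'
--     if head == 'bugfix' or head == 'fix':
--         return 'bugfix'
--     if head == 'hotfix':
--         return 'hotfix'
--     if head == 'chore':
--         return 'chore'
--     if head == 'docs':
--         return 'docs'
--     if head == 'refactor':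
--         return 'refactor'
--     if head == 'test':
--         return 'test'
--     if head == 'release':
--         return 'release'
--     return 'feature'
-- ===== Notes on version B (the rewrite author's own statement) =====
-- stated objective: simpler
-- what changed: B replaces the ten-way startswith scan over a prefix table by extracting the first '/'-separated segment once (str.partition) and classifying that segment with direct equality tests, defaulting to 'feature'.
import Mathlib
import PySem

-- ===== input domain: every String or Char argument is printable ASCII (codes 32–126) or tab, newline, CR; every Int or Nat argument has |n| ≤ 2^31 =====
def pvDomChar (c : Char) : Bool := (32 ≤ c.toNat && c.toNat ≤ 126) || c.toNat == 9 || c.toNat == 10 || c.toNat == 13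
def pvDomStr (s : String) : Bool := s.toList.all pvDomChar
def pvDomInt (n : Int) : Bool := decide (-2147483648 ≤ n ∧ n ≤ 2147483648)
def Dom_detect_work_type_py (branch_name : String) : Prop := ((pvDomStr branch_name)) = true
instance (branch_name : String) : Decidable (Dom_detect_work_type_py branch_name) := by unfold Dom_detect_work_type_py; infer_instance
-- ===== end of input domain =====

-- B replaces the ten-way startswith scan over a prefix table by extracting the first
-- '/'-separated segment once (partition) and classifying it by direct equality tests; objective: simpler.

-- ===== PORT A =====
-- A's dict of prefixes, iterated in insertion order by the for-loop
def pvPrefixesA : List (String × String) :=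
  [("feature/", "feature"), ("feat/", "feature"), ("bugfix/", "bugfix"),
   ("fix/", "bugfix"), ("hotfix/", "hotfix"), ("chore/", "chore"),
   ("docs/", "docs"), ("refactor/", "refactor"), ("test/", "test"),
   ("release/", "release")]

-- the for-loop with early return = first pair whose prefix matches, else the default
def detect_work_type_py (branch_name : String) : String :=
  match pvPrefixesA.find? (fun pw => PySem.Str.startswith branch_name pw.1) with
  | some pw => pw.2
  | none => "feature"

-- ===== PORT B =====
-- Source B's if/elif chain on the first segment, transliterated test for test
def pvClassify (head : String) : String :=
  if head = "feature" ∨ head = "feat" then "feature"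
  else if head = "bugfix" ∨ head = "fix" then "bugfix"
  else if head = "hotfix" then "hotfix"
  else if head = "chore" then "chore"
  else if head = "docs" then "docs"
  else if head = "refactor" then "refactor"
  else if head = "test" then "test"
  else if head = "release" then "release"
  else "feature"

-- branch_name.partition('/'): head = chars before the first '/'; sep nonempty iff '/' occurs.
-- Exact for the single-character separator '/': head is the longest '/'-free prefix.
def detect_work_type_py_alt (branch_name : String) : String :=
  let l := branch_name.toList
  if '/' ∈ l then pvClassify (String.ofList (l.takeWhile (· ≠ '/')))
  else "feature"

-- ===== PRECONDITION & SPEC =====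
def Spec_detect_work_type_py (branch_name : String) (out : String) : Prop := out = detect_work_type_py_alt branch_name
instance (branch_name : String) (out : String) : Decidable (Spec_detect_work_type_py branch_name out) := by unfold Spec_detect_work_type_py; infer_instance

-- ===== CLAIM (what is proved, stated in full; the proofs are below) =====
def Claim_equal_detect_work_type_py : Prop := ∀ (branch_name : String), Dom_detect_work_type_py branch_name → Spec_detect_work_type_py branch_name (detect_work_type_py branch_name)

-- ===== LEMMAS AND PROOFS =====

-- startswith by "k/" (k slash-free) ↔ '/' occurs and the first '/'-free segment is exactly k
theorem pv_key_iff (s : String) (k : List Char) (hk : '/' ∉ k) :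
    PySem.Str.startswith s (String.ofList (k ++ ['/'])) = true ↔
      ('/' ∈ s.toList ∧ s.toList.takeWhile (· ≠ '/') = k) := by
  constructor
  · intro hsw
    have hpre : (k ++ ['/']) <+: s.toList := by
      have h1 := hsw
      rw [PySem.Str.startswith_eq, PySem.Chars.startswith_iff] at h1
      simpa using h1
    obtain ⟨t, ht⟩ := hpre
    constructor
    · rw [← ht]; simp
    · rw [← ht, List.append_assoc,
        List.takeWhile_append_of_pos (by
          intro a ha
          simp only [ne_eq, decide_eq_true_eq]
          intro h
          exact hk (h ▸ ha))]
      simp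
  · rintro ⟨hmem, htake⟩
    have hsplit := List.takeWhile_append_dropWhile (p := fun c => decide (c ≠ '/')) (l := s.toList)
    have hdw : s.toList.dropWhile (fun c => decide (c ≠ '/')) ≠ [] := by
      intro hnil
      rw [hnil, List.append_nil] at hsplit
      have h2 : ('/' : Char) ∈ s.toList.takeWhile (fun c => decide (c ≠ '/')) := by
        rw [hsplit]; exact hmem
      have := List.mem_takeWhile_imp h2
      simp at this
    obtain ⟨c, rest, hcr⟩ := List.exists_cons_of_ne_nil hdw
    have hc : c = '/' := by
      have hhd := List.head?_dropWhile_not (p := fun c => decide (c ≠ '/')) (l := s.toList)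
      rw [hcr] at hhd
      simpa using hhd
    rw [PySem.Str.startswith_eq, PySem.Chars.startswith_iff]
    refine ⟨rest, ?_⟩
    have : (String.ofList (k ++ ['/'])).toList = k ++ ['/'] := by simp
    rw [this, ← hsplit, hcr, hc, htake]
    simp

-- if '/' never occurs in the branch name, no "k/" key is a prefix of it
theorem pv_no_slash (s : String) (k : List Char) (hmem : '/' ∉ s.toList) :
    PySem.Str.startswith s (String.ofList (k ++ ['/'])) = false := by
  cases hcase : PySem.Str.startswith s (String.ofList (k ++ ['/'])) with
  | false => rfl
  | true =>
    exfalso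
    rw [PySem.Str.startswith_eq, PySem.Chars.startswith_iff] at hcase
    obtain ⟨t, ht⟩ := (by simpa using hcase : (k ++ ['/']) <+: s.toList)
    exact hmem (by rw [← ht]; simp)

-- ===== VERDICT (by name: the statement is the Claim_ definition above) =====
theorem detect_work_type_py_spec : Claim_equal_detect_work_type_py := by
  intro s _
  unfold Spec_detect_work_type_py detect_work_type_py detect_work_type_py_alt pvPrefixesA
  rw [show ("feature/" : String) = String.ofList (['f','e','a','t','u','r','e'] ++ ['/']) from rfl,
      show ("feat/" : String) = String.ofList (['f','e','a','t'] ++ ['/']) from rfl,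
      show ("bugfix/" : String) = String.ofList (['b','u','g','f','i','x'] ++ ['/']) from rfl,
      show ("fix/" : String) = String.ofList (['f','i','x'] ++ ['/']) from rfl,
      show ("hotfix/" : String) = String.ofList (['h','o','t','f','i','x'] ++ ['/']) from rfl,
      show ("chore/" : String) = String.ofList (['c','h','o','r','e'] ++ ['/']) from rfl,
      show ("docs/" : String) = String.ofList (['d','o','c','s'] ++ ['/']) from rfl,
      show ("refactor/" : String) = String.ofList (['r','e','f','a','c','t','o','r'] ++ ['/']) from rfl,
      show ("test/" : String) = String.ofList (['t','e','s','t'] ++ ['/']) from rfl,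
      show ("release/" : String) = String.ofList (['r','e','l','e','a','s','e'] ++ ['/']) from rfl]
  by_cases hmem : '/' ∈ s.toList
  · simp only [if_pos hmem]
    have hkey : ∀ (k : List Char), '/' ∉ k →
        PySem.Str.startswith s (String.ofList (k ++ ['/']))
          = decide (s.toList.takeWhile (· ≠ '/') = k) := by
      intro k hk
      by_cases he : s.toList.takeWhile (· ≠ '/') = k
      · exact ((pv_key_iff s k hk).mpr ⟨hmem, he⟩).trans (by rw [he]; simp)
      · simp only [he, decide_false]
        cases hcase : PySem.Str.startswith s (String.ofList (k ++ ['/'])) with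
        | false => rfl
        | true => exact absurd ((pv_key_iff s k hk).mp hcase).2 he
    simp only [List.find?]
    rw [hkey ['f','e','a','t','u','r','e'] (by decide),
        hkey ['f','e','a','t'] (by decide),
        hkey ['b','u','g','f','i','x'] (by decide),
        hkey ['f','i','x'] (by decide),
        hkey ['h','o','t','f','i','x'] (by decide),
        hkey ['c','h','o','r','e'] (by decide),
        hkey ['d','o','c','s'] (by decide),
        hkey ['r','e','f','a','c','t','o','r'] (by decide),
        hkey ['t','e','s','t'] (by decide),
        hkey ['r','e','l','e','a','s','e'] (by decide)]
  -- compare the decided chain of A with B's classifier of the same segment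
    generalize s.toList.takeWhile (· ≠ '/') = t
    have hq : ∀ lit : List Char, (String.ofList t = String.ofList lit) ↔ t = lit := by
      intro lit
      constructor
      · intro he; have := congrArg String.toList he; simpa using this
      · intro he; rw [he]
    by_cases h1 : t = ['f','e','a','t','u','r','e']; · subst h1; decide
    by_cases h2 : t = ['f','e','a','t']; · subst h2; decide
    by_cases h3 : t = ['b','u','g','f','i','x']; · subst h3; decide
    by_cases h4 : t = ['f','i','x']; · subst h4; decide
    by_cases h5 : t = ['h','o','t','f','i','x']; · subst h5; decide
    by_cases h6 : t = ['c','h','o','r','e']; · subst h6; decide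
    by_cases h7 : t = ['d','o','c','s']; · subst h7; decide
    by_cases h8 : t = ['r','e','f','a','c','t','o','r']; · subst h8; decide
    by_cases h9 : t = ['t','e','s','t']; · subst h9; decide
    by_cases h10 : t = ['r','e','l','e','a','s','e']; · subst h10; decide
    -- no segment matches: A falls through to the default, B's chain reaches its final else
    rw [decide_eq_false h1, decide_eq_false h2, decide_eq_false h3, decide_eq_false h4,
        decide_eq_false h5, decide_eq_false h6, decide_eq_false h7, decide_eq_false h8,
        decide_eq_false h9, decide_eq_false h10]
    have hne : ∀ lit : List Char, t ≠ lit → String.ofList t ≠ String.ofList lit :=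
      fun lit h he => h ((hq lit).mp he)
    simp only [pvClassify,
      show ("feature" : String) = String.ofList ['f','e','a','t','u','r','e'] from rfl,
      show ("feat" : String) = String.ofList ['f','e','a','t'] from rfl,
      show ("bugfix" : String) = String.ofList ['b','u','g','f','i','x'] from rfl,
      show ("fix" : String) = String.ofList ['f','i','x'] from rfl,
      show ("hotfix" : String) = String.ofList ['h','o','t','f','i','x'] from rfl,
      show ("chore" : String) = String.ofList ['c','h','o','r','e'] from rfl,
      show ("docs" : String) = String.ofList ['d','o','c','s'] from rfl,
      show ("refactor" : String) = String.ofList ['r','e','f','a','c','t','o','r'] from rfl,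
      show ("test" : String) = String.ofList ['t','e','s','t'] from rfl,
      show ("release" : String) = String.ofList ['r','e','l','e','a','s','e'] from rfl,
      hne _ h1, hne _ h2, hne _ h3, hne _ h4, hne _ h5, hne _ h6, hne _ h7, hne _ h8,
      hne _ h9, hne _ h10, or_self, if_false]
  · simp only [if_neg hmem]
    have hns : ∀ k : List Char,
        PySem.Str.startswith s (String.ofList (k ++ ['/'])) = false :=
      fun k => pv_no_slash s k hmem
    simp only [List.find?, hns]
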